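-- pv_equiv track=rewrite | github.com/wilkinszhang/CSLearn | src/python/CanReach.py | can_reach_positions
-- ===== SOURCE A (Python) =====
-- def can_reach_positions(n, k, s):
--     """
--     Determine if each position on the number line can be reached.
--
--     Args:
--         n: Number of points on the number line (1 to n)
--         k: Current position (1-indexed)
--         s: Instruction string with 'L', 'R', and '?'
--
--     Returns:
--         List of booleans indicating if each position can be reached
--     """
--     # Convert to 0-indexed for easier calculations
--     k = k - 1
--
--     # Calculate leftmost and rightmost positions when replacing ? with L or R
--     min_left = k
--     max_right = k
--
--     # First pass: replace ? with L to find leftmost position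
--     position = k
--     for char in s:
--         if char == 'R':
--             position += 1
--         else:  # char is 'L' or '?' (both treated as 'L' for min calculation)
--             position -= 1
--         min_left = min(min_left, position)
--
--     # Second pass: replace ? with R to find rightmost position
--     position = k
--     for char in s:
--         if char == 'L':
--             position -= 1
--         else:  # char is 'R' or '?' (both treated as 'R' for max calculation)
--             position += 1
--         max_right = max(max_right, position)
--
--     # For each position, check if it's within the reachable range
--     result = []
--     for i in range(n):
--         can_reach = min_left <= i <= max_right
--         if can_reach==True:
--             result.append('1')
--         else:
--             result.append('0')
--
--     return result
-- ===== SOURCE B (Python) =====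
-- def can_reach_positions(n, k, s):
--     # Backward scan: extremes of the walk's displacement over the suffix, by the
--     # recursion mn(c+t) = min(d, d + mn(t)) (? as L) / mx(c+t) = max(d, d + mx(t)) (? as R);
--     # then clamp the interval to [0, n-1] and write it with one slice assignment.
--     mn = mx = 0
--     for c in reversed(s):
--         mn = min(-1, mn - 1) if c != 'R' else min(1, mn + 1)
--         mx = max(1, mx + 1) if c != 'L' else max(-1, mx - 1)
--     lo = max(0, k - 1 + min(0, mn))
--     hi = min(n - 1, k - 1 + max(0, mx))
--     res = ['0'] * max(n, 0)
--     if lo <= hi: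
--         res[lo:hi+1] = ['1'] * (hi - lo + 1)
--     return res
-- ===== Notes on version B (the rewrite author's own statement) =====
-- stated objective: alternative
-- what changed: A makes two forward scans tracking running extremes of absolute positions and then a per-index membership loop over range(n); B makes one backward scan computing the suffix displacement extremes by the recursion mn = min(d, d+mn) / mx = max(d, d+mx), clamps the resulting interval to [0, n-1], and writes it into a pre-built '0'-list with a single slice assignment.
import Mathlib
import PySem

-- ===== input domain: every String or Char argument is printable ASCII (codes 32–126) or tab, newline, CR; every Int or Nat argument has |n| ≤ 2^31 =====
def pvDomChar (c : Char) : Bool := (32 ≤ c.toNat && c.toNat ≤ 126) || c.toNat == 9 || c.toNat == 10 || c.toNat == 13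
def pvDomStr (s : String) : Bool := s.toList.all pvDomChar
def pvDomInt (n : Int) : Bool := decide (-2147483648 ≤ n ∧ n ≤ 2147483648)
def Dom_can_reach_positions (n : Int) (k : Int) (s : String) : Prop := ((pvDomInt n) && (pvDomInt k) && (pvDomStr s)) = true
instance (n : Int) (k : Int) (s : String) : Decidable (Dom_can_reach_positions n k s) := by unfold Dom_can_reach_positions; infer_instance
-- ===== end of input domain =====

-- B replaces A's two forward scans of absolute position extremes and per-index loop by one
-- backward scan computing suffix displacement extremes, then one slice write into a '0'-list.

-- ===== PORT A =====
def can_reach_positions (n : Int) (k : Int) (s : String) : List String :=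
  let k' := k - 1
  -- first pass: ? treated as L, track minimum
  let st1 := s.toList.foldl
    (fun (st : Int × Int) c =>
      let p := if c == 'R' then st.1 + 1 else st.1 - 1
      (p, min st.2 p)) (k', k')
  let min_left := st1.2
  -- second pass: ? treated as R, track maximum
  let st2 := s.toList.foldl
    (fun (st : Int × Int) c =>
      let p := if c == 'L' then st.1 - 1 else st.1 + 1
      (p, max st.2 p)) (k', k')
  let max_right := st2.2
  (PySem.List.pyRange 0 n 1).foldl
    (fun acc i => if min_left ≤ i ∧ i ≤ max_right then acc ++ ["1"] else acc ++ ["0"]) []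

-- ===== PORT B =====
def can_reach_positions_alt (n : Int) (k : Int) (s : String) : List String :=
  let st := s.toList.reverse.foldl
    (fun (st : Int × Int) c =>
      ((if c != 'R' then min (-1) (st.1 - 1) else min 1 (st.1 + 1)),
       (if c != 'L' then max 1 (st.2 + 1) else max (-1) (st.2 - 1)))) (0, 0)
  let lo := max 0 (k - 1 + min 0 st.1)
  let hi := min (n - 1) (k - 1 + max 0 st.2)
  let res := List.replicate (max n 0).toNat "0"
  if lo ≤ hi then
    -- res[lo:hi+1] = ['1'] * (hi - lo + 1)
    res.take lo.toNat ++ List.replicate (hi - lo + 1).toNat "1" ++ res.drop (hi + 1).toNat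
  else res

-- ===== PRECONDITION & SPEC =====
def Spec_can_reach_positions (n : Int) (k : Int) (s : String) (out : List String) : Prop := out = can_reach_positions_alt n k s
instance (n : Int) (k : Int) (s : String) (out : List String) : Decidable (Spec_can_reach_positions n k s out) := by unfold Spec_can_reach_positions; infer_instance

-- ===== CLAIM (what is proved, stated in full; the proofs are below) =====
def Claim_equal_can_reach_positions : Prop := ∀ (n : Int) (k : Int) (s : String), Dom_can_reach_positions n k s → Spec_can_reach_positions n k s (can_reach_positions n k s)

-- ===== LEMMAS AND PROOFS =====

-- B's pair fold computed componentwise (as two independent folds)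
def pvMn (l : List Char) : Int :=
  l.foldr (fun c m => if c != 'R' then min (-1) (m - 1) else min 1 (m + 1)) 0
def pvMx (l : List Char) : Int :=
  l.foldr (fun c m => if c != 'L' then max 1 (m + 1) else max (-1) (m - 1)) 0

theorem foldB_components (l : List Char) :
    l.reverse.foldl
      (fun (st : Int × Int) c =>
        ((if c != 'R' then min (-1) (st.1 - 1) else min 1 (st.1 + 1)),
         (if c != 'L' then max 1 (st.2 + 1) else max (-1) (st.2 - 1)))) (0, 0)
    = (pvMn l, pvMx l) := by
  rw [List.foldl_reverse]
  induction l with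
  | nil => rfl
  | cons c t ih =>
    simp only [List.foldr_cons, ih, pvMn, pvMx]

theorem foldA_min (l : List Char) (p lo : Int) (h : lo ≤ p) :
    (l.foldl (fun (st : Int × Int) c =>
      let q := if c == 'R' then st.1 + 1 else st.1 - 1
      (q, min st.2 q)) (p, lo)).2 = min lo (p + min 0 (pvMn l)) := by
  induction l generalizing p lo with
  | nil => simp [pvMn]; omega
  | cons c t ih =>
    cases hb : (c == 'R') with
    | false =>
      have hbne : (c != 'R') = true := by simp [bne, hb]
      have hstep : pvMn (c :: t) = -1 + min 0 (pvMn t) := by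
        simp only [pvMn, List.foldr_cons, hbne, if_true]; omega
      simp only [List.foldl_cons, hb, Bool.false_eq_true, if_false]
      rw [ih (p - 1) (min lo (p - 1)) (by omega), hstep]
      omega
    | true =>
      have hbne : (c != 'R') = false := by simp [bne, hb]
      have hstep : pvMn (c :: t) = 1 + min 0 (pvMn t) := by
        simp only [pvMn, List.foldr_cons, hbne, Bool.false_eq_true, if_false]; omega
      simp only [List.foldl_cons, hb, if_true]
      rw [ih (p + 1) (min lo (p + 1)) (by omega), hstep]
      omega

theorem foldA_max (l : List Char) (p hi : Int) (h : p ≤ hi) :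
    (l.foldl (fun (st : Int × Int) c =>
      let q := if c == 'L' then st.1 - 1 else st.1 + 1
      (q, max st.2 q)) (p, hi)).2 = max hi (p + max 0 (pvMx l)) := by
  induction l generalizing p hi with
  | nil => simp [pvMx]; omega
  | cons c t ih =>
    cases hb : (c == 'L') with
    | false =>
      have hbne : (c != 'L') = true := by simp [bne, hb]
      have hstep : pvMx (c :: t) = 1 + max 0 (pvMx t) := by
        simp only [pvMx, List.foldr_cons, hbne, if_true]; omega
      simp only [List.foldl_cons, hb, Bool.false_eq_true, if_false]
      rw [ih (p + 1) (max hi (p + 1)) (by omega), hstep]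
      omega
    | true =>
      have hbne : (c != 'L') = false := by simp [bne, hb]
      have hstep : pvMx (c :: t) = -1 + max 0 (pvMx t) := by
        simp only [pvMx, List.foldr_cons, hbne, Bool.false_eq_true, if_false]; omega
      simp only [List.foldl_cons, hb, if_true]
      rw [ih (p - 1) (max hi (p - 1)) (by omega), hstep]
      omega

theorem pvMn_nonpos (l : List Char) : min 0 (pvMn l) ≤ 0 := by simp
theorem pvMx_nonneg (l : List Char) : 0 ≤ max 0 (pvMx l) := by simp

-- build-by-append loop = map
theorem foldl_ind (l : List Int) (mn mx : Int) (acc : List String) :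
    l.foldl (fun acc i => if mn ≤ i ∧ i ≤ mx then acc ++ ["1"] else acc ++ ["0"]) acc
    = acc ++ l.map (fun i => if mn ≤ i ∧ i ≤ mx then "1" else "0") := by
  induction l generalizing acc with
  | nil => simp
  | cons x t ih => simp only [List.foldl_cons, List.map_cons]; split_ifs <;> rw [ih] <;> simp

-- the indicator map over 0..n-1 equals B's slice-written '0'-list
theorem map_range_eq_slice (n mnl mxr : Int) (h : mnl ≤ mxr) :
    ((PySem.List.pyRange 0 n 1).map
        (fun i => if mnl ≤ i ∧ i ≤ mxr then ("1" : String) else "0"))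
    = (let lo := max 0 mnl
       let hi := min (n - 1) mxr
       let res := List.replicate (max n 0).toNat "0"
       if lo ≤ hi then
         res.take lo.toNat ++ List.replicate (hi - lo + 1).toNat "1" ++ res.drop (hi + 1).toNat
       else res) := by
  rw [PySem.List.pyRange_one]
  simp only [Int.sub_zero, List.take_replicate, List.drop_replicate]
  split_ifs with hba
  · apply List.ext_getElem (by simp; omega)
    intro i h1 h2
    simp only [List.length_map, List.length_range] at h1
    simp only [List.getElem_map, List.getElem_range, List.getElem_append,
               List.length_append, List.length_replicate, List.getElem_replicate]
    split_ifs <;> first | rfl | (exfalso; omega)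
  · rw [show (max n 0).toNat = n.toNat by omega]
    apply List.ext_getElem (by simp)
    intro i h1 h2
    simp only [List.length_map, List.length_range] at h1
    simp only [List.getElem_map, List.getElem_range, List.getElem_replicate]
    rw [if_neg]
    omega

-- ===== VERDICT (by name: the statement is the Claim_ definition above) =====
theorem can_reach_positions_spec : Claim_equal_can_reach_positions := by
  intro n k s _
  unfold Spec_can_reach_positions can_reach_positions can_reach_positions_alt
  rw [foldB_components, foldl_ind, List.nil_append,
      foldA_min s.toList (k - 1) (k - 1) le_rfl,
      foldA_max s.toList (k - 1) (k - 1) le_rfl]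
  have h1 : min (k - 1) (k - 1 + min 0 (pvMn s.toList)) = k - 1 + min 0 (pvMn s.toList) := by
    have := pvMn_nonpos s.toList; omega
  have h2 : max (k - 1) (k - 1 + max 0 (pvMx s.toList)) = k - 1 + max 0 (pvMx s.toList) := by
    have := pvMx_nonneg s.toList; omega
  rw [h1, h2, map_range_eq_slice]
  have := pvMn_nonpos s.toList
  have := pvMx_nonneg s.toList
  omega
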